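-- pv_equiv track=rewrite | github.com/sushismurf/Python-cleaned | CS115/exercises-for-study/CodingBat/String2/xyz_other.py | xyz_there
-- ===== SOURCE A (Python) =====
-- def xyz_there(s):
--   if 'xyz' in s:
--     if '.' not in s:
--       return True
--     else:
--       for i in range(len(s)-3):
--         if s[i] == '.':
--           if s[i+1] == 'x':
--             if s[i+2] == 'y':
--               if s[i+3] == 'z':
--                 return False
--       return True
--   else:
--     return False
-- ===== SOURCE B (Python) =====
-- def xyz_there(s):
--   return 'xyz' in s and '.xyz' not in s
-- ===== Notes on version B (the rewrite author's own statement) =====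
-- stated objective: simpler
-- what changed: Replaces A's nested branches and explicit index-by-index character scan with a single boolean expression of two substring-membership tests ('xyz' in s and '.xyz' not in s).
import Mathlib
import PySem

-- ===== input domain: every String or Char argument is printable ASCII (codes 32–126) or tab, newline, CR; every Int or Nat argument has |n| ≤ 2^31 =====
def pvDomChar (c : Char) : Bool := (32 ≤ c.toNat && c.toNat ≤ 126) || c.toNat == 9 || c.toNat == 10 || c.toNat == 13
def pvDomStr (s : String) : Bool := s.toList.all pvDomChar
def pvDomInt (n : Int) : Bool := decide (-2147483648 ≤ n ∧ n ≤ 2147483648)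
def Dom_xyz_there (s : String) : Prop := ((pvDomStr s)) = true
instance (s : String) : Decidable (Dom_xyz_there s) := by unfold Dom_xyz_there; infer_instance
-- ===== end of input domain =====

-- B replaces A's nested branches and explicit index scan by a single boolean
-- expression of two substring-membership tests; same behaviour, simpler.

-- ===== PORT A =====
-- the explicit 'for i in range(len(s)-3)' scan with early 'return False'
def xyzLoopA (cs : List Char) : List Int → Bool
  | [] => true
  | i :: rest =>
    if PySem.List.pyGet? cs i = some '.' then
      if PySem.List.pyGet? cs (i+1) = some 'x' then
        if PySem.List.pyGet? cs (i+2) = some 'y' then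
          if PySem.List.pyGet? cs (i+3) = some 'z' then false
          else xyzLoopA cs rest
        else xyzLoopA cs rest
      else xyzLoopA cs rest
    else xyzLoopA cs rest

def xyz_there (s : String) : Bool :=
  if PySem.Str.isIn "xyz" s then
    if !PySem.Str.isIn "." s then true
    else xyzLoopA s.toList (PySem.List.pyRange 0 ((PySem.Str.len s : Int) - 3) 1)
  else false

-- ===== PORT B =====
def xyz_there_alt (s : String) : Bool :=
  PySem.Str.isIn "xyz" s && !PySem.Str.isIn ".xyz" s

-- ===== PRECONDITION & SPEC =====
def Spec_xyz_there (s : String) (out : Bool) : Prop := out = xyz_there_alt s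
instance (s : String) (out : Bool) : Decidable (Spec_xyz_there s out) := by unfold Spec_xyz_there; infer_instance

-- ===== CLAIM (what is proved, stated in full; the proofs are below) =====
def Claim_equal_xyz_there : Prop := ∀ (s : String), Dom_xyz_there s → Spec_xyz_there s (xyz_there s)

-- ===== LEMMAS AND PROOFS =====

-- a four-element prefix, char by char
theorem four_prefix_iff (l : List Char) (a b c d : Char) :
    ([a, b, c, d] <+: l) ↔
      (l[0]? = some a ∧ l[1]? = some b ∧ l[2]? = some c ∧ l[3]? = some d) := by
  constructor
  · rintro ⟨t, rfl⟩
    simp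
  · rintro ⟨h0, h1, h2, h3⟩
    match l with
    | [] => simp at h0
    | [_] => simp at h1
    | [_, _] => simp at h2
    | [_, _, _] => simp at h3
    | x :: y :: z :: w :: rest =>
      simp at h0 h1 h2 h3
      subst h0; subst h1; subst h2; subst h3
      exact ⟨rest, rfl⟩

-- ".xyz" starting at position n, as a prefix of the drop
theorem fourAt (cs : List Char) (n : Nat) :
    (['.', 'x', 'y', 'z'] <+: cs.drop n) ↔
      (cs[n]? = some '.' ∧ cs[n+1]? = some 'x' ∧ cs[n+2]? = some 'y' ∧ cs[n+3]? = some 'z') := by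
  rw [four_prefix_iff]
  simp [List.getElem?_drop]

-- A's scan returns False exactly when some index in the list carries ".xyz"
theorem xyzLoopA_eq_false_iff (cs : List Char) (idxs : List Int) :
    xyzLoopA cs idxs = false ↔
      ∃ i ∈ idxs, PySem.List.pyGet? cs i = some '.' ∧ PySem.List.pyGet? cs (i+1) = some 'x' ∧
        PySem.List.pyGet? cs (i+2) = some 'y' ∧ PySem.List.pyGet? cs (i+3) = some 'z' := by
  induction idxs with
  | nil => simp [xyzLoopA]
  | cons i rest ih =>
    simp only [xyzLoopA]
    split_ifs with h1 h2 h3 h4 <;> simp_all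

-- the scanned index range finds ".xyz" exactly when it is an infix
theorem range_hit_iff_infix (cs : List Char) :
    (∃ i ∈ PySem.List.pyRange 0 ((cs.length : Int) - 3) 1,
        PySem.List.pyGet? cs i = some '.' ∧ PySem.List.pyGet? cs (i+1) = some 'x' ∧
        PySem.List.pyGet? cs (i+2) = some 'y' ∧ PySem.List.pyGet? cs (i+3) = some 'z') ↔
      ['.', 'x', 'y', 'z'] <:+: cs := by
  constructor
  · rintro ⟨i, hmem, h⟩
    rw [PySem.List.mem_pyRange_one] at hmem
    obtain ⟨n, rfl⟩ : ∃ n : Nat, i = (n : Int) := ⟨i.toNat, (Int.toNat_of_nonneg hmem.1).symm⟩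
    have e1 : (n : Int) + 1 = ((n + 1 : Nat) : Int) := by push_cast; ring
    have e2 : (n : Int) + 2 = ((n + 2 : Nat) : Int) := by push_cast; ring
    have e3 : (n : Int) + 3 = ((n + 3 : Nat) : Int) := by push_cast; ring
    rw [e1, e2, e3] at h
    simp only [PySem.List.pyGet?_natCast] at h
    have hpre : ['.', 'x', 'y', 'z'] <+: cs.drop n := (fourAt cs n).mpr h
    exact hpre.isInfix.trans (cs.drop_suffix n).isInfix
  · rintro ⟨pre, suf, hps⟩
    have hdrop : cs.drop pre.length = ['.', 'x', 'y', 'z'] ++ suf := by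
      rw [← hps, List.append_assoc, List.drop_left]
    have hpre : ['.', 'x', 'y', 'z'] <+: cs.drop pre.length := ⟨suf, hdrop.symm⟩
    have hlen : cs.length = pre.length + 4 + suf.length := by
      rw [← hps]; simp; omega
    refine ⟨(pre.length : Int), ?_, ?_⟩
    · rw [PySem.List.mem_pyRange_one]
      constructor
      · positivity
      · omega
    · have h := (fourAt cs pre.length).mp hpre
      have e1 : (pre.length : Int) + 1 = ((pre.length + 1 : Nat) : Int) := by push_cast; ring
      have e2 : (pre.length : Int) + 2 = ((pre.length + 2 : Nat) : Int) := by push_cast; ring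
      have e3 : (pre.length : Int) + 3 = ((pre.length + 3 : Nat) : Int) := by push_cast; ring
      rw [e1, e2, e3]
      simp only [PySem.List.pyGet?_natCast]
      exact h

theorem dotxyz_toList : ".xyz".toList = ['.', 'x', 'y', 'z'] := by decide

-- ===== VERDICT (by name: the statement is the Claim_ definition above) =====
theorem xyz_there_spec : Claim_equal_xyz_there := by
  intro s _
  unfold Spec_xyz_there xyz_there xyz_there_alt
  cases hx : PySem.Str.isIn "xyz" s with
  | false => simp
  | true =>
    simp only [Bool.true_and, if_true]
    cases hd : PySem.Str.isIn "." s with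
    | false =>
      -- '.' not in s, so ".xyz" not in s either: both sides are true
      simp only [Bool.not_false, if_true]
      cases hz : PySem.Str.isIn ".xyz" s with
      | false => rfl
      | true =>
        exfalso
        have hinf : ".xyz".toList <:+: s.toList := (PySem.Str.isIn_iff_infix _ _).mp hz
        have hdot : ['.'] <:+: ".xyz".toList := ⟨[], ['x', 'y', 'z'], rfl⟩
        have hds : ".".toList <:+: s.toList := by
          have e : ".".toList = ['.'] := by decide
          rw [e]; exact hdot.trans hinf
        have : PySem.Str.isIn "." s = true := (PySem.Str.isIn_iff_infix _ _).mpr hds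
        rw [hd] at this
        exact Bool.false_ne_true this
    | true =>
      -- '.' in s: A runs the scan; it returns false iff ".xyz" is an infix
      simp only [Bool.not_true]
      have key : xyzLoopA s.toList (PySem.List.pyRange 0 ((PySem.Str.len s : Int) - 3) 1) = false ↔
          ".xyz".toList <:+: s.toList := by
        rw [xyzLoopA_eq_false_iff, PySem.Str.len_eq, dotxyz_toList]
        exact range_hit_iff_infix s.toList
      cases hz : PySem.Str.isIn ".xyz" s with
      | false =>
        have : ¬ ".xyz".toList <:+: s.toList := by
          intro h
          have := (PySem.Str.isIn_iff_infix _ _).mpr h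
          rw [hz] at this
          exact Bool.false_ne_true this
        cases hl : xyzLoopA s.toList (PySem.List.pyRange 0 ((PySem.Str.len s : Int) - 3) 1) with
        | false => exact absurd (key.mp hl) this
        | true => rfl
      | true =>
        have := key.mpr ((PySem.Str.isIn_iff_infix _ _).mp hz)
        rw [this]; rfl
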